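-- pv_equiv track=rewrite | github.com/Nitro-five/hillel-python-basic | HW 10.2.py | first_word
-- ===== SOURCE A (Python) =====
-- def first_word(text):
--     """ Пошук першого слова """
--     text = text.lstrip(" ,.")
--     word = ''
--     for i in text:
--         if i.isalpha() or i == "'":
--             word += i
--         elif word:
--             break
--     return word
-- ===== SOURCE B (Python) =====
-- def first_word(text):
--     """ Пошук першого слова """
--     masked = ''.join(c if c.isalpha() or c == "'" else ' ' for c in text)
--     parts = masked.split()
--     return parts[0] if parts else ''
-- ===== Notes on version B (the rewrite author's own statement) =====
-- stated objective: idiomatic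
-- what changed: Instead of a stateful accumulate-and-break scan, B normalises every non-word character to a space in one map pass and then tokenises with str.split(), returning the first token (or '' when there is none).
import Mathlib
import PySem

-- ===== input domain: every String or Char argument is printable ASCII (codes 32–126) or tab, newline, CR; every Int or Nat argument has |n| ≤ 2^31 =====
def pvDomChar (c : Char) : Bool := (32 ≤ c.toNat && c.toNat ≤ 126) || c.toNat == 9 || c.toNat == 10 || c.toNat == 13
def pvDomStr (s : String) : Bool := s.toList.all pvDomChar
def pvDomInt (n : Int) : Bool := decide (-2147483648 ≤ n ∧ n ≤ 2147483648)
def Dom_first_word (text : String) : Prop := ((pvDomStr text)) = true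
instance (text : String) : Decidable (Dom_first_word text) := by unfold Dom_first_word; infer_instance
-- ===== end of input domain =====

-- B replaces A's stateful accumulate-and-break scan by mask-then-tokenise: map every
-- non-word character to a space, split() the result, take the first token; objective: idiomatic.

-- shared word-character test: i.isalpha() or i == "'"
def fwPred (c : Char) : Bool := PySem.Chars.isalpha c || c == '\''

-- ===== PORT A =====
-- hand port of text.lstrip(" ,."): drop leading chars that are in " ,." (exact)
def fwLstrip : List Char → List Char
  | [] => []
  | c :: rest => if c == ' ' || c == ',' || c == '.' then fwLstrip rest else c :: rest

-- the for-loop of A, with the accumulated word as state; 'elif word: break' returns word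
def fwLoopA : List Char → List Char → List Char
  | [], word => word
  | c :: rest, word =>
      if fwPred c then fwLoopA rest (word ++ [c])
      else if word ≠ [] then word
      else fwLoopA rest word

def first_word (text : String) : String :=
  String.ofList (fwLoopA (fwLstrip text.toList) [])

-- ===== PORT B =====
-- c if pred(c) else ' ' for one generator element
def fwMask1 (c : Char) : Char := if fwPred c then c else ' '

-- masked = ''.join(c if pred(c) else ' ' for c in text); parts = masked.split(); parts[0] if parts else ''
def first_word_alt (text : String) : String :=
  match PySem.Str.split₀ (String.ofList (text.toList.map fwMask1)) with
  | [] => ""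
  | w :: _ => w

-- ===== PRECONDITION & SPEC =====
def Spec_first_word (text : String) (out : String) : Prop := out = first_word_alt text
instance (text : String) (out : String) : Decidable (Spec_first_word text out) := by unfold Spec_first_word; infer_instance

-- ===== CLAIM =====
def Claim_equal_first_word : Prop := ∀ (text : String), Dom_first_word text → Spec_first_word text (first_word text)

-- ===== LEMMAS AND PROOFS =====

-- the first word char and the rest of the list after it (A's effective search phase)
def fwFind : List Char → Option (Char × List Char)
  | [] => none
  | c :: rest => if fwPred c then some (c, rest) else fwFind rest

-- the leading run of word chars (A's effective collect phase)
def fwTake : List Char → List Char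
  | [] => []
  | c :: rest => if fwPred c then c :: fwTake rest else []

theorem fwPred_not_isspace (c : Char) (h : fwPred c = true) : PySem.Chars.isspace c = false := by
  simp only [fwPred, PySem.Chars.isalpha, PySem.Chars.isupper, PySem.Chars.islower,
    Bool.or_eq_true, Bool.and_eq_true, decide_eq_true_eq, beq_iff_eq] at h
  have hn : (65 ≤ c.toNat ∧ c.toNat ≤ 90) ∨ (97 ≤ c.toNat ∧ c.toNat ≤ 122) ∨ c.toNat = 39 := by
    rcases h with (⟨h1, h2⟩ | ⟨h1, h2⟩) | h1
    · exact Or.inl ⟨h1, h2⟩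
    · exact Or.inr (Or.inl ⟨h1, h2⟩)
    · subst h1; exact Or.inr (Or.inr rfl)
  simp only [PySem.Chars.isspace, Bool.or_eq_false_iff, Bool.and_eq_false_iff,
    decide_eq_false_iff_not]
  omega

theorem fwMask1_of_pred (c : Char) (h : fwPred c = true) : fwMask1 c = c := by
  simp [fwMask1, h]

theorem fwMask1_of_not_pred (c : Char) (h : fwPred c = false) : fwMask1 c = ' ' := by
  simp [fwMask1, h]

-- split₀.go prepends acc.reverse to what it computes from an empty accumulator
theorem go_acc (cs : List Char) : ∀ cur acc,
    PySem.Chars.split₀.go cs cur acc = acc.reverse ++ PySem.Chars.split₀.go cs cur [] := by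
  induction cs with
  | nil =>
      intro cur acc
      by_cases h : cur.isEmpty = true <;> simp [PySem.Chars.split₀.go.eq_1, h]
  | cons c rest ih =>
      intro cur acc
      rw [PySem.Chars.split₀.go.eq_2, PySem.Chars.split₀.go.eq_2]
      by_cases hs : PySem.Chars.isspace c = true
      · rw [if_pos hs, if_pos hs]
        by_cases h : cur.isEmpty = true
        · rw [if_pos h, if_pos h]; exact ih [] acc
        · rw [if_neg h, if_neg h, ih [] (cur.reverse :: acc), ih [] [cur.reverse]]
          simp
      · rw [if_neg hs, if_neg hs]; exact ih (c :: cur) acc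

-- with a nonempty current token, go over the masked tail yields the token extended by the word run
theorem go_mask_ne (cs : List Char) : ∀ cur : List Char, cur ≠ [] →
    PySem.Chars.split₀.go (cs.map fwMask1) cur [] = (cur.reverse ++ fwTake cs) ::
      (PySem.Chars.split₀.go (cs.map fwMask1) cur []).tail := by
  induction cs with
  | nil =>
      intro cur hcur
      rw [List.map_nil, PySem.Chars.split₀.go.eq_1]
      simp [fwTake, List.isEmpty_eq_false_iff.mpr hcur]
  | cons c rest ih =>
      intro cur hcur
      by_cases hp : fwPred c = true
      · have hs := fwPred_not_isspace c hp
        rw [List.map_cons, fwMask1_of_pred c hp, PySem.Chars.split₀.go.eq_2, if_neg (by simp [hs])]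
        rw [ih (c :: cur) (by simp)]
        simp [fwTake, hp]
      · rw [List.map_cons, fwMask1_of_not_pred c (by simpa using hp), PySem.Chars.split₀.go,
          if_pos (by decide), if_neg (by simp [List.isEmpty_eq_false_iff.mpr hcur]),
          go_acc]
        simp [fwTake, hp]

-- with an empty current token, go over the masked list finds fwFind's result first
theorem go_mask_nil (cs : List Char) :
    PySem.Chars.split₀.go (cs.map fwMask1) [] [] = match fwFind cs with
      | none => []
      | some (c, rest) => (c :: fwTake rest) ::
          (PySem.Chars.split₀.go (cs.map fwMask1) [] []).tail := by
  induction cs with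
  | nil => rfl
  | cons c rest ih =>
      by_cases hp : fwPred c = true
      · have hs := fwPred_not_isspace c hp
        rw [List.map_cons, fwMask1_of_pred c hp]
        simp only [fwFind, hp, if_true]
        rw [PySem.Chars.split₀.go.eq_2, if_neg (by simp [hs])]
        rw [go_mask_ne rest [c] (by simp)]
        simp
      · rw [List.map_cons, fwMask1_of_not_pred c (by simpa using hp)]
        simp only [fwFind, hp, if_false, Bool.false_eq_true]
        rw [PySem.Chars.split₀.go.eq_2, if_pos (by decide), if_pos List.isEmpty_nil]
        exact ih

-- B's search phase ignores the chars stripped by A's lstrip(" ,.")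
theorem fwFind_fwLstrip (cs : List Char) : fwFind (fwLstrip cs) = fwFind cs := by
  induction cs with
  | nil => rfl
  | cons c rest ih =>
      by_cases h : (c == ' ' || c == ',' || c == '.') = true
      · have hp : fwPred c = false := by
          rcases Bool.or_eq_true_iff.mp h with h' | h'
          · rcases Bool.or_eq_true_iff.mp h' with h'' | h'' <;>
              [rw [eq_of_beq h'']; rw [eq_of_beq h'']] <;> decide
          · rw [eq_of_beq h']; decide
        simp [fwLstrip, fwFind, h, hp, ih]
      · simp [fwLstrip, h]

-- once the word is nonempty, A's loop appends exactly the leading fwPred-run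
theorem fwLoopA_ne (cs : List Char) (w : List Char) (hw : w ≠ []) :
    fwLoopA cs w = w ++ fwTake cs := by
  induction cs generalizing w with
  | nil => simp [fwLoopA, fwTake]
  | cons c rest ih =>
      by_cases h : fwPred c = true
      · have := ih (w ++ [c]) (by simp)
        simp [fwLoopA, fwTake, h, this]
      · simp [fwLoopA, fwTake, h, hw]

-- with an empty word, A's loop is find-then-take
theorem fwLoopA_nil (cs : List Char) :
    fwLoopA cs [] = match fwFind cs with
      | none => []
      | some (c, rest) => c :: fwTake rest := by
  induction cs with
  | nil => rfl
  | cons c rest ih =>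
      by_cases h : fwPred c = true
      · simp [fwLoopA, fwFind, h, fwLoopA_ne rest [c] (by simp)]
      · simp [fwLoopA, fwFind, h, ih]

-- ===== VERDICT =====
theorem first_word_spec : Claim_equal_first_word := by
  intro text _
  unfold Spec_first_word first_word first_word_alt
  have hsplit : List.map String.toList (PySem.Str.split₀ (String.ofList (text.toList.map fwMask1)))
      = PySem.Chars.split₀.go (text.toList.map fwMask1) [] [] := by
    rw [PySem.Str.split₀_map_toList]
    simp [PySem.Chars.split₀]
  rw [fwLoopA_nil, fwFind_fwLstrip]
  have hgo := go_mask_nil text.toList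
  cases hf : fwFind text.toList with
  | none =>
      rw [hf] at hgo
      clear hf
      cases hps : PySem.Str.split₀ (String.ofList (text.toList.map fwMask1)) with
      | nil => rfl
      | cons w ws => rw [hps, hgo] at hsplit; simp at hsplit
  | some p =>
      obtain ⟨c, rest⟩ := p
      rw [hf] at hgo
      clear hf
      cases hps : PySem.Str.split₀ (String.ofList (text.toList.map fwMask1)) with
      | nil => rw [hps, hgo] at hsplit; simp at hsplit
      | cons w ws =>
          rw [hps, hgo] at hsplit
          simp only [List.map_cons, List.cons.injEq] at hsplit
          have hw : w = String.ofList (c :: fwTake rest) := by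
            have := hsplit.1
            calc w = String.ofList w.toList := by simp
              _ = String.ofList (c :: fwTake rest) := by rw [this]
          simp [hw]
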